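-- pv_equiv track=rewrite | github.com/nguyencongminh090/AutoCopy | utils/__init__.py | get
-- ===== SOURCE A (Python) =====
-- def valid(move, sizeX=15, sizeY=15):
--     if len(move) < 2:
--         return False
--     x, y = convertMove(move, sizeY)
--     return 0 <= x < (sizeX) and 0 <= y < (sizeY)
--
-- def convertMove(move, sizeY=15):
--     return [ord(move[0]) - 97, sizeY - int(move[1:])]
--
-- def get(string, sizeX=15, sizeY=15):
--     if string and string[0]:
--         cur = string[0]
--         string = string[1:]
--         while string:
--             if string[0].isnumeric():
--                 cur += string[0]
--                 string = string[1:]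
--             else:
--                 break
--         cur = cur if valid(cur, sizeX, sizeY) else ''
--         if cur:
--             return [convertMove(cur, sizeY)] + get(string, sizeX, sizeY)
--         else:
--             return get(string, sizeX, sizeY)
--     else:
--         return []
-- ===== SOURCE B (Python) =====
-- def get(string, sizeX=15, sizeY=15):
--     res = []
--     i, n = 0, len(string)
--     while i < n:
--         c = string[i]
--         j = i + 1
--         while j < n and string[j].isnumeric():
--             j += 1
--         if j > i + 1:
--             x = ord(c) - 97
--             y = sizeY - int(string[i + 1:j])
--             if 0 <= x < sizeX and 0 <= y < sizeY:
--                 res.append([x, y])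
--         i = j
--     return res
-- ===== Notes on version B (the rewrite author's own statement) =====
-- stated objective: faster
-- what changed: A re-slices the string and recurses for every token (quadratic copying); B is a single left-to-right index-based tokenizer that appends valid moves to a result list in one pass.
import Mathlib
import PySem

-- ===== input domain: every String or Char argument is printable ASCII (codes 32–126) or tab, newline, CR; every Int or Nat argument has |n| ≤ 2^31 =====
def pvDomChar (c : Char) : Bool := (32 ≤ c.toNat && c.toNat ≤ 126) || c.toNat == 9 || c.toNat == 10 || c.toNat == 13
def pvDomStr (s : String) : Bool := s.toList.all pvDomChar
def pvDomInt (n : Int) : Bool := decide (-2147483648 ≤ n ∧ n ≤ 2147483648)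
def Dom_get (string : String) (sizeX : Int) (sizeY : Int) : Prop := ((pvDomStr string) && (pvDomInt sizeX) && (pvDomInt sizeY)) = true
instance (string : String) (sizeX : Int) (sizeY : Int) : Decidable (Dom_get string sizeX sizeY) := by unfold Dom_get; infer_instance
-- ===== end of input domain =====

-- B replaces A's recursive slice-and-rebuild scan (O(n^2)) by a single left-to-right
-- tokenizer that never re-slices the tail; objective: faster (asymptotic).

-- ===== PORT A =====
-- convertMove(move, sizeY) = [ord(move[0]) - 97, sizeY - int(move[1:])]
-- 'move[0]' via headD and 'int(move[1:])' via ofChars? with getD 0: every call site passes a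
-- token of length ≥ 2 whose tail is all digits, so the defaults are unreachable (no exception).
def convertMoveA (move : List Char) (sizeY : Int) : List Int :=
  [((move.headD ' ').toNat : Int) - 97, sizeY - (PySem.Int.ofChars? (move.drop 1)).getD 0]

-- valid(move, sizeX, sizeY)
def validA (move : List Char) (sizeX : Int) (sizeY : Int) : Bool :=
  if move.length < 2 then false
  else
    let xy := convertMoveA move sizeY
    decide (0 ≤ xy[0]! ∧ xy[0]! < sizeX ∧ 0 ≤ xy[1]! ∧ xy[1]! < sizeY)

-- A's inner while-loop: cur += string[0]; string = string[1:] while string[0].isnumeric()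
-- (str.isnumeric equals Chars.isdigit on the ASCII domain)
def getConsume (cur : List Char) (s : List Char) : List Char × List Char :=
  match s with
  | [] => (cur, [])
  | c :: t => if PySem.Chars.isdigit c then getConsume (cur ++ [c]) t else (cur, c :: t)

theorem getConsume_eq (cur : List Char) (s : List Char) :
    getConsume cur s = (cur ++ s.takeWhile PySem.Chars.isdigit, s.dropWhile PySem.Chars.isdigit) := by
  induction s generalizing cur with
  | nil => simp [getConsume]
  | cons c t ih =>
    by_cases h : PySem.Chars.isdigit c
    · simp [getConsume, h, ih]
    · simp [getConsume, h]

-- A's recursion on the string ('if string and string[0]': a one-char string is always truthy,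
-- so the guard is exactly non-emptiness)
def getAuxA (s : List Char) (sizeX : Int) (sizeY : Int) : List (List Int) :=
  match s with
  | [] => []
  | c :: t =>
    let p := getConsume [c] t
    let cur := if validA p.1 sizeX sizeY then p.1 else []
    if cur ≠ [] then convertMoveA cur sizeY :: getAuxA p.2 sizeX sizeY
    else getAuxA p.2 sizeX sizeY
termination_by s.length
decreasing_by
  all_goals
    simp only [getConsume_eq]
    have := t.length_dropWhile_le PySem.Chars.isdigit
    simp; omega

def get (string : String) (sizeX : Int) (sizeY : Int) : List (List Int) :=
  getAuxA string.toList sizeX sizeY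

-- ===== PORT B =====
-- Source B's single pass: res is the accumulator, the inner index scan j is the
-- takeWhile run of digits after position i, and i = j advances past the run.
def getAltGo (res : List (List Int)) (s : List Char) (sizeX : Int) (sizeY : Int) : List (List Int) :=
  match s with
  | [] => res
  | c :: t =>
    let digits := t.takeWhile PySem.Chars.isdigit
    let rest := t.drop digits.length
    let res' :=
      if digits.length > 0 then
        let x : Int := (c.toNat : Int) - 97
        let y : Int := sizeY - (PySem.Int.ofChars? digits).getD 0
        if 0 ≤ x ∧ x < sizeX ∧ 0 ≤ y ∧ y < sizeY then res ++ [[x, y]] else res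
      else res
    getAltGo res' rest sizeX sizeY
termination_by s.length
decreasing_by
  all_goals
    simp only [List.length_drop, List.length_cons]
    omega

def get_alt (string : String) (sizeX : Int) (sizeY : Int) : List (List Int) :=
  getAltGo [] string.toList sizeX sizeY

-- ===== PRECONDITION & SPEC =====
def Spec_get (string : String) (sizeX : Int) (sizeY : Int) (out : List (List Int)) : Prop := out = get_alt string sizeX sizeY
instance (string : String) (sizeX : Int) (sizeY : Int) (out : List (List Int)) : Decidable (Spec_get string sizeX sizeY out) := by unfold Spec_get; infer_instance

-- ===== CLAIM (what is proved, stated in full; the proofs are below) =====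
def Claim_equal_get : Prop := ∀ (string : String) (sizeX : Int) (sizeY : Int), Dom_get string sizeX sizeY → Spec_get string sizeX sizeY (get string sizeX sizeY)

-- ===== LEMMAS AND PROOFS =====

theorem dropWhile_eq_drop_takeWhile {α : Type} (p : α → Bool) (l : List α) :
    l.dropWhile p = l.drop (l.takeWhile p).length := by
  induction l with
  | nil => rfl
  | cons a t ih =>
    by_cases h : p a <;> simp [h, ih]

theorem getAltGo_acc (res : List (List Int)) (s : List Char) (sizeX sizeY : Int) :
    getAltGo res s sizeX sizeY = res ++ getAltGo [] s sizeX sizeY := by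
  induction hn : s.length using Nat.strong_induction_on generalizing s res with
  | _ n ih =>
    match s with
    | [] => simp [getAltGo]
    | c :: t =>
      have hn' : t.length + 1 = n := by simpa using hn
      rw [getAltGo, getAltGo]
      set digits := t.takeWhile PySem.Chars.isdigit with hdig
      have hlt : (t.drop digits.length).length < n := by
        rw [List.length_drop]; omega
      by_cases hd : digits.length > 0
      · rw [if_pos hd, if_pos hd]
        by_cases hb : (0 ≤ (c.toNat : Int) - 97 ∧ (c.toNat : Int) - 97 < sizeX ∧
            0 ≤ sizeY - (PySem.Int.ofChars? digits).getD 0 ∧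
            sizeY - (PySem.Int.ofChars? digits).getD 0 < sizeY)
        · rw [if_pos hb, if_pos hb, ih _ hlt _ _ rfl,
              ih _ hlt ([] ++ [[(c.toNat : Int) - 97, sizeY - (PySem.Int.ofChars? digits).getD 0]]) _ rfl]
          simp
        · rw [if_neg hb, if_neg hb]
          exact ih _ hlt _ _ rfl
      · rw [if_neg hd, if_neg hd]
        exact ih _ hlt _ _ rfl

theorem getAux_eq (s : List Char) (sizeX sizeY : Int) :
    getAuxA s sizeX sizeY = getAltGo [] s sizeX sizeY := by
  induction hn : s.length using Nat.strong_induction_on generalizing s with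
  | _ n ih =>
    match s with
    | [] => simp [getAuxA, getAltGo]
    | c :: t =>
      have hn' : t.length + 1 = n := by simpa using hn
      rw [getAuxA, getAltGo]
      simp only [getConsume_eq]
      set digits := t.takeWhile PySem.Chars.isdigit with hdig
      have hdw : t.dropWhile PySem.Chars.isdigit = t.drop digits.length :=
        dropWhile_eq_drop_takeWhile _ _
      have hlt : (t.drop digits.length).length < n := by
        rw [List.length_drop]; omega
      rw [hdw]
      by_cases hd : digits.length > 0
      · -- the token has a digit tail: A's valid-test equals B's bounds test
        have hv : validA ([c] ++ digits) sizeX sizeY =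
            decide (0 ≤ (c.toNat : Int) - 97 ∧ (c.toNat : Int) - 97 < sizeX ∧
              0 ≤ sizeY - (PySem.Int.ofChars? digits).getD 0 ∧
              sizeY - (PySem.Int.ofChars? digits).getD 0 < sizeY) := by
          rw [validA]
          have hlen : ¬ (([c] ++ digits).length < 2) := by
            simp only [List.length_append, List.length_cons, List.length_nil]; omega
          rw [if_neg hlen]
          simp [convertMoveA]
        rw [if_pos hd, hv]
        by_cases hb : (0 ≤ (c.toNat : Int) - 97 ∧ (c.toNat : Int) - 97 < sizeX ∧
            0 ≤ sizeY - (PySem.Int.ofChars? digits).getD 0 ∧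
            sizeY - (PySem.Int.ofChars? digits).getD 0 < sizeY)
        · have hdec : (decide (0 ≤ (c.toNat : Int) - 97 ∧ (c.toNat : Int) - 97 < sizeX ∧
              0 ≤ sizeY - (PySem.Int.ofChars? digits).getD 0 ∧
              sizeY - (PySem.Int.ofChars? digits).getD 0 < sizeY)) = true := decide_eq_true hb
          rw [if_pos hdec, if_pos hb]
          have hne : ([c] ++ digits : List Char) ≠ [] := by simp
          rw [if_pos hne, ih _ hlt _ rfl,
              getAltGo_acc ([] ++ [[((c.toNat : Int)) - 97, sizeY - (PySem.Int.ofChars? digits).getD 0]])]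
          simp [convertMoveA]
        · have hdec : (decide (0 ≤ (c.toNat : Int) - 97 ∧ (c.toNat : Int) - 97 < sizeX ∧
              0 ≤ sizeY - (PySem.Int.ofChars? digits).getD 0 ∧
              sizeY - (PySem.Int.ofChars? digits).getD 0 < sizeY)) ≠ true := by
            simpa using hb
          rw [if_neg hdec, if_neg hb]
          have hne : ¬ (([] : List Char) ≠ []) := by simp
          rw [if_neg hne]
          exact ih _ hlt _ rfl
      · -- no digit follows c: the token is too short, both sides just skip it
        have hdig0 : digits = [] := List.eq_nil_of_length_eq_zero (by omega)
        have hv : validA ([c] ++ digits) sizeX sizeY = false := by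
          rw [validA, if_pos]; simp [hdig0]
        rw [if_neg hd, hv]
        have hne : ¬ (([] : List Char) ≠ []) := by simp
        rw [if_neg (by simp : ¬ (false = true)), if_neg hne]
        exact ih _ hlt _ rfl

-- ===== VERDICT (by name: the statement is the Claim_ definition above) =====
theorem get_spec : Claim_equal_get := by
  intro string sizeX sizeY _
  unfold Spec_get
  exact getAux_eq string.toList sizeX sizeY
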